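-- pv_equiv track=rewrite | github.com/may3rd/process-engineering-suite | packages/hydraulics/src/utils/units.py | _tokenize_units
-- ===== SOURCE A (Python) =====
-- from typing import Final, List
--
-- def _tokenize_units(expr: str) -> List[str]:
--     tokens: List[str] = []
--     current: List[str] = []
--     for char in expr:
--         if char in "*/":
--             if current:
--                 tokens.append("".join(current).strip())
--                 current = []
--             tokens.append(char)
--         else:
--             current.append(char)
--     if current:
--         tokens.append("".join(current).strip())
--     return tokens
-- ===== SOURCE B (Python) =====
-- from typing import Final, List
--
-- def _tokenize_units(expr: str) -> List[str]:
--     # scan segment-wise: slice out the run up to the next operator, emit it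
--     # stripped if non-empty, emit the operator, continue after it
--     tokens: List[str] = []
--     i, n = 0, len(expr)
--     while i < n:
--         j = i
--         while j < n and expr[j] not in "*/":
--             j += 1
--         if j > i:
--             tokens.append(expr[i:j].strip())
--         if j < n:
--             tokens.append(expr[j])
--         i = j + 1
--     return tokens
-- ===== Notes on version B (the rewrite author's own statement) =====
-- stated objective: simpler
-- what changed: Replaces the stateful char-accumulator loop with a segment-wise scan: slice out each maximal operator-free run, emit it stripped when non-empty, emit the operator, and continue after it.
import Mathlib
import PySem

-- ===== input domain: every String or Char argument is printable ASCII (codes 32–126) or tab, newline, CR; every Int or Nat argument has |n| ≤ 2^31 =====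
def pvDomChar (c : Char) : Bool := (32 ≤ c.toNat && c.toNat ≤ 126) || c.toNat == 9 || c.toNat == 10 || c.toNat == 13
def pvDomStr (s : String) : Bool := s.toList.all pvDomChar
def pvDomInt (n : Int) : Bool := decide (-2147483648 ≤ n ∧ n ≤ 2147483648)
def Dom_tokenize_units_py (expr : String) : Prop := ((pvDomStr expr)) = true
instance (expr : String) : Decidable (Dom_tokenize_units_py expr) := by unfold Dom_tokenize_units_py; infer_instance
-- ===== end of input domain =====

-- Header: B replaces A's stateful char-accumulator loop by a recursive split at the
-- first '*' or '/' operator (objective: simpler); proved equal on all inputs.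


-- ===== PORT A =====
-- the for-loop over expr with state (tokens, current); final flush of current
def tokALoop : List Char → List String → List Char → List String
  | [], tokens, current =>
      if current ≠ [] then tokens ++ [String.mk (PySem.Chars.strip current)] else tokens
  | c :: cs, tokens, current =>
      if c == '*' || c == '/' then
        tokALoop cs
          ((if current ≠ [] then tokens ++ [String.mk (PySem.Chars.strip current)] else tokens)
            ++ [String.mk [c]]) []
      else
        tokALoop cs tokens (current ++ [c])

def tokenize_units_py (expr : String) : List String :=
  tokALoop expr.toList [] []

-- ===== PORT B =====
-- Source B's segment-wise while loop, read as recursion on the remaining suffix: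
-- head = run up to the next operator (inner scan), then the operator, then continue
def tokBRec (cs : List Char) : List String :=
  let head := cs.takeWhile (fun c => !(c == '*' || c == '/'))
  match h : cs.dropWhile (fun c => !(c == '*' || c == '/')) with
  | [] => if cs ≠ [] then [String.mk (PySem.Chars.strip cs)] else []
  | op :: tail =>
      (if head ≠ [] then [String.mk (PySem.Chars.strip head)] else [])
        ++ [String.mk [op]] ++ tokBRec tail
termination_by cs.length
decreasing_by
  have := List.takeWhile_append_dropWhile (p := fun c => !(c == '*' || c == '/')) (l := cs)
  have hlen : cs.length = head.length + (op :: tail).length := by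
    rw [← this, h]; simp [head]
  simp at hlen ⊢; omega

def tokenize_units_py_alt (expr : String) : List String :=
  tokBRec expr.toList

-- ===== PRECONDITION & SPEC =====
def Spec_tokenize_units_py (expr : String) (out : List String) : Prop := out = tokenize_units_py_alt expr
instance (expr : String) (out : List String) : Decidable (Spec_tokenize_units_py expr out) := by unfold Spec_tokenize_units_py; infer_instance

-- ===== CLAIM (what is proved, stated in full; the proofs are below) =====
def Claim_equal_tokenize_units_py : Prop := ∀ (expr : String), Dom_tokenize_units_py expr → Spec_tokenize_units_py expr (tokenize_units_py expr)

-- ===== LEMMAS AND PROOFS =====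

theorem takeWhile_append_all {p : Char → Bool} {pre l : List Char}
    (h : pre.all p) : (pre ++ l).takeWhile p = pre ++ l.takeWhile p := by
  induction pre with
  | nil => simp
  | cons a as ih =>
      simp only [List.all_cons, Bool.and_eq_true] at h
      simp [h.1, ih h.2]

theorem dropWhile_append_all {p : Char → Bool} {pre l : List Char}
    (h : pre.all p) : (pre ++ l).dropWhile p = l.dropWhile p := by
  induction pre with
  | nil => simp
  | cons a as ih =>
      simp only [List.all_cons, Bool.and_eq_true] at h
      simp [h.1, ih h.2]

-- unfolding equations for tokBRec, keyed on the shape of the dropWhile result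
theorem tokBRec_drop_nil {cs : List Char}
    (h : cs.dropWhile (fun c => !(c == '*' || c == '/')) = []) :
    tokBRec cs = if cs ≠ [] then [String.mk (PySem.Chars.strip cs)] else [] := by
  rw [tokBRec]
  split
  · rfl
  · next op tail h2 => rw [h] at h2; cases h2

theorem tokBRec_drop_cons {cs : List Char} {op : Char} {tail : List Char}
    (h : cs.dropWhile (fun c => !(c == '*' || c == '/')) = op :: tail) :
    tokBRec cs =
      (if cs.takeWhile (fun c => !(c == '*' || c == '/')) ≠ [] then
          [String.mk (PySem.Chars.strip (cs.takeWhile (fun c => !(c == '*' || c == '/'))))]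
        else []) ++ [String.mk [op]] ++ tokBRec tail := by
  rw [tokBRec]
  split
  · next h2 => rw [h] at h2; cases h2
  · next op' tail' h2 =>
      rw [h] at h2
      cases h2
      rfl

-- loop invariant: running A's loop from (tokens, current) yields tokens ++ B's result on current ++ rest
theorem tokALoop_eq_tokB (cs : List Char) :
    ∀ (tokens : List String) (current : List Char),
      current.all (fun c => !(c == '*' || c == '/')) →
      tokALoop cs tokens current = tokens ++ tokBRec (current ++ cs) := by
  induction cs with
  | nil =>
      intro tokens current hcur
      have hd : (current ++ ([] : List Char)).dropWhile (fun c => !(c == '*' || c == '/')) = [] := by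
        simpa using dropWhile_append_all (l := []) hcur
      rw [tokBRec_drop_nil hd]
      by_cases hc : current = [] <;> simp [tokALoop, hc]
  | cons c cs ih =>
      intro tokens current hcur
      by_cases hop : (c == '*' || c == '/') = true
      · have hop' : c = '*' ∨ c = '/' := by simpa using hop
        have ht : (current ++ c :: cs).takeWhile (fun c => !(c == '*' || c == '/')) = current := by
          rw [takeWhile_append_all hcur]
          rcases hop' with h | h <;> simp [h]
        have hd : (current ++ c :: cs).dropWhile (fun c => !(c == '*' || c == '/')) = c :: cs := by
          rw [dropWhile_append_all hcur]
          rcases hop' with h | h <;> simp [h]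
        rw [tokBRec_drop_cons hd, ht]
        rw [tokALoop]
        simp only [hop, if_true]
        rw [ih _ [] (by simp)]
        by_cases hc : current = [] <;> simp [hc]
      · rw [Bool.not_eq_true] at hop
        have hall : (current ++ [c]).all (fun c => !(c == '*' || c == '/')) := by
          simp_all
        rw [tokALoop]
        simp only [hop, Bool.false_eq_true, if_false]
        rw [ih tokens (current ++ [c]) hall]
        simp

-- ===== VERDICT (by name: the statement is the Claim_ definition above) =====
theorem tokenize_units_py_spec : Claim_equal_tokenize_units_py := by
  intro expr _
  unfold Spec_tokenize_units_py tokenize_units_py tokenize_units_py_alt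
  simpa using tokALoop_eq_tokB expr.toList [] [] (by simp)
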